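-- pv_equiv track=rewrite | github.com/ElchaabiMohamed/InferCode_SVM | Du-42487-python-files/program_37496.py | swap_keys_values
-- ===== SOURCE A (Python) =====
-- def swap_keys_values(d):
-- 	new_dict={}
-- 	values=[]
-- 	keys=[]
-- 	for (z,q) in (list(d.items())):
-- 		keys.append(q)
-- 		values.append(z)
-- 	for (z,q) in (list(d.items())):
-- 		if not keys.count(q) > 1 :
-- 			new_dict[q]=z
-- 	return(new_dict)
-- ===== SOURCE B (Python) =====
-- def swap_keys_values(d):
--     new_dict = {}
--     dups = set()
--     for k, v in d.items():
--         if v in dups: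
--             continue
--         if v in new_dict:
--             del new_dict[v]
--             dups.add(v)
--         else:
--             new_dict[v] = k
--     return new_dict
-- ===== Notes on version B (the rewrite author's own statement) =====
-- stated objective: faster
-- what changed: B is a single online pass over d.items(): it inserts value->key into the result as values arrive and, on seeing a value a second time, deletes that entry and blacklists the value in a dup set, so no counting pass, no rescan and no grouping table exist.
import Mathlib
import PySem

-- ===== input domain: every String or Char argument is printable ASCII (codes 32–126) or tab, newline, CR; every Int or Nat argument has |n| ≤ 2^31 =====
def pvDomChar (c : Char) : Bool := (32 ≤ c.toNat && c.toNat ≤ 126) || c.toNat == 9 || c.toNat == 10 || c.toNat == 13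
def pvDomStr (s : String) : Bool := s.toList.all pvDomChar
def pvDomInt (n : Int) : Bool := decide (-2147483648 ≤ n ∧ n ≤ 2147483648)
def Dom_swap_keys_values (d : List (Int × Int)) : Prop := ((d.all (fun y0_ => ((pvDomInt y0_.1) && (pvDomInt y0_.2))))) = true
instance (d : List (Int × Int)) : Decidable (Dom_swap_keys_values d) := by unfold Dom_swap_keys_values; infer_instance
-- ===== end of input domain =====

-- B replaces A's two staged passes (collect all values, then rescan with keys.count per item)
-- by ONE online pass that inserts value->key and, on a repeated value, deletes the entry and
-- blacklists the value in a dup set: faster (asymptotic).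

-- ===== PORT A =====
-- literal transliteration of A: build the `keys`/`values` lists by appending, then re-scan
-- d, inserting q ↦ z whenever not keys.count(q) > 1
def swap_keys_values (d : List (Int × Int)) : List (Int × Int) :=
  let keys := d.foldl (fun ks p => ks ++ [p.2]) ([] : List Int)
  let _values := d.foldl (fun vs p => vs ++ [p.1]) ([] : List Int)
  let new_dict := d.foldl
    (fun nd p => if ¬ (keys.count p.2 > 1) then nd.insert p.2 p.1 else nd)
    (PySem.Dict.empty : PySem.Dict Int Int)
  new_dict.items

-- ===== PORT B =====
-- literal transliteration of B's loop body: `if v in dups: continue` / `elif v in new_dict: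
-- del new_dict[v]; dups.add(v)` / `else: new_dict[v] = k`, on the state (new_dict, dups)
def bstep (st : PySem.Dict Int Int × PySem.Set Int) (p : Int × Int) :
    PySem.Dict Int Int × PySem.Set Int :=
  if PySem.Set.contains st.2 p.2 then st
  else if st.1.contains p.2 then (st.1.erase p.2, PySem.Set.add st.2 p.2)
  else (st.1.insert p.2 p.1, st.2)

def swap_keys_values_alt (d : List (Int × Int)) : List (Int × Int) :=
  (d.foldl bstep ((PySem.Dict.empty : PySem.Dict Int Int), PySem.Set.empty)).1.items

-- ===== PRECONDITION & SPEC =====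
def Spec_swap_keys_values (d : List (Int × Int)) (out : List (Int × Int)) : Prop := out = swap_keys_values_alt d
instance (d : List (Int × Int)) (out : List (Int × Int)) : Decidable (Spec_swap_keys_values d out) := by unfold Spec_swap_keys_values; infer_instance

-- ===== CLAIM (what is proved, stated in full; the proofs are below) =====
def Claim_equal_swap_keys_values : Prop := ∀ (d : List (Int × Int)), Dom_swap_keys_values d → Spec_swap_keys_values d (swap_keys_values d)

-- ===== LEMMAS AND PROOFS =====

-- `for x in l: acc.append(f x)` builds acc ++ l.map f
lemma foldl_append_map {α β : Type} (f : α → β) :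
    ∀ (l : List α) (acc : List β),
      l.foldl (fun ks p => ks ++ [f p]) acc = acc ++ l.map f := by
  intro l
  induction l with
  | nil => simp
  | cons a t ih => intro acc; simp [List.foldl_cons, ih]

-- A's guarded insert loop is an insert fold over the filtered list
lemma A_fold (keys : List Int) :
    ∀ (l : List (Int × Int)) (nd : PySem.Dict Int Int),
      l.foldl (fun nd p => if ¬ (keys.count p.2 > 1) then nd.insert p.2 p.1 else nd) nd
        = (l.filter (fun p => decide (¬ (keys.count p.2 > 1)))).foldl
            (fun nd p => nd.insert p.2 p.1) nd := by
  intro l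
  induction l with
  | nil => intro nd; simp
  | cons a t ih =>
    intro nd
    rw [List.foldl_cons, List.filter_cons]
    by_cases h : keys.count a.2 > 1
    · rw [if_neg (not_not_intro h), if_neg (by simp [h]), ih]
    · rw [if_pos h, if_pos (by simp [h]), List.foldl_cons, ih]

-- A's result: the pairs (q, z) of d whose value q occurs exactly once
lemma A_items (d : List (Int × Int)) :
    swap_keys_values d
      = (d.filter (fun p => (d.map Prod.snd).count p.2 == 1)).map (fun p => (p.2, p.1)) := by
  simp only [swap_keys_values, foldl_append_map, List.nil_append]
  rw [A_fold]
  have hc : d.filter (fun p => decide (¬ ((d.map Prod.snd).count p.2 > 1)))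
      = d.filter (fun p => (d.map Prod.snd).count p.2 == 1) := by
    apply List.filter_congr
    intro p hp
    have hmem : p.2 ∈ d.map Prod.snd := List.mem_map_of_mem hp
    have hone : 1 ≤ (d.map Prod.snd).count p.2 := List.one_le_count_iff.mpr hmem
    by_cases hgt : (d.map Prod.snd).count p.2 > 1
    · simp only [hgt, not_true_eq_false, decide_false]
      have : ((d.map Prod.snd).count p.2 == 1) = false := by
        simp only [beq_eq_false_iff_ne, ne_eq]; omega
      rw [this]
    · simp only [hgt, not_false_eq_true, decide_true]
      have : ((d.map Prod.snd).count p.2 == 1) = true := by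
        simp only [beq_iff_eq]; omega
      rw [this]
  rw [hc]
  rw [PySem.Dict.items_foldl_insert_fresh _ Prod.snd Prod.fst _
        (fun a _ => PySem.Dict.contains_empty _) ?_]
  · rfl
  · rw [List.nodup_iff_count_le_one]
    intro a
    by_cases hle : (d.map Prod.snd).count a ≤ 1
    · calc List.count a (List.map Prod.snd (d.filter _))
            ≤ List.count a (d.map Prod.snd) :=
              List.Sublist.count_le a (List.Sublist.map _ List.filter_sublist)
        _ ≤ 1 := hle
    · have hnm : a ∉ List.map Prod.snd
          (d.filter (fun p => (d.map Prod.snd).count p.2 == 1)) := by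
        intro hmem
        obtain ⟨q, hq, hqa⟩ := List.mem_map.mp hmem
        have hqf := List.of_mem_filter hq
        rw [hqa] at hqf
        simp only [beq_iff_eq] at hqf
        omega
      rw [List.count_eq_zero.mpr hnm]
      omega

-- membership in an erased dict
lemma contains_erase (nd : PySem.Dict Int Int) (k v : Int) :
    (nd.erase k).contains v = (nd.contains v && !(v == k)) := by
  simp only [PySem.Dict.contains, PySem.Dict.erase, List.any_filter]
  rw [Bool.eq_iff_iff]
  simp only [List.any_eq_true, Bool.and_eq_true, Bool.not_eq_true', beq_iff_eq,
    beq_eq_false_iff_ne, ne_eq]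
  constructor
  · rintro ⟨a, ha, hne, heq⟩; exact ⟨⟨a, ha, heq⟩, heq ▸ hne⟩
  · rintro ⟨⟨a, ha, heq⟩, hne⟩; exact ⟨a, ha, heq ▸ hne, heq⟩

-- membership in a set after add
lemma set_contains_add (S : PySem.Set Int) (x v : Int) :
    PySem.Set.contains (PySem.Set.add S x) v
      = (PySem.Set.contains S v || v == x) := by
  rw [Bool.eq_iff_iff]
  simp only [Bool.or_eq_true, beq_iff_eq, PySem.Set.contains_iff, PySem.Set.mem_add]

-- the items p of the remaining input that B's loop will still add and keep:
-- value not blacklisted, not already present, and occurring exactly once from here on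
def bNew (S : PySem.Set Int) (nd : PySem.Dict Int Int) (vs : List Int) (p : Int × Int) : Bool :=
  !(PySem.Set.contains S p.2) && !(nd.contains p.2) && (vs.count p.2 == 1)

-- invariant of B's loop: the surviving old entries (those whose key never recurs in l)
-- in place, followed by the new unique-valued pairs of l in order
lemma B_loop :
    ∀ (l : List (Int × Int)) (nd : PySem.Dict Int Int) (S : PySem.Set Int),
      (∀ v ∈ S, nd.contains v = false) → nd.keys.Nodup →
      (l.foldl bstep (nd, S)).1.items
        = nd.items.filter (fun q => !((l.map Prod.snd).contains q.1))
          ++ (l.filter (bNew S nd (l.map Prod.snd))).map (fun p => (p.2, p.1)) := by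
  intro l
  induction l with
  | nil => intro nd S _ _; simp
  | cons p t ih =>
    intro nd S hdisj hnd
    rw [List.foldl_cons]
    by_cases hS : PySem.Set.contains S p.2 = true
    · -- v in dups: skip
      have hstep : bstep (nd, S) p = (nd, S) := by
        simp only [bstep]; rw [if_pos hS]
      have hpk : nd.contains p.2 = false :=
        hdisj p.2 ((PySem.Set.contains_iff _ _).mp hS)
      rw [hstep, ih nd S hdisj hnd]
      congr 1
      · apply List.filter_congr
        intro q hq
        have hqk : q.1 ≠ p.2 := by
          intro h
          have hc : nd.contains q.1 = true := by
            rw [PySem.Dict.contains_iff_mem_keys]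
            exact PySem.Dict.mem_keys_of_mem_items _ hq
          rw [h, hpk] at hc; exact absurd hc (by simp)
        rw [List.map_cons, List.contains_cons]
        simp [hqk]
      · congr 1
        rw [List.map_cons, List.filter_cons]
        have hp0 : bNew S nd (p.2 :: t.map Prod.snd) p = false := by
          simp only [bNew]; rw [hS]; simp
        rw [hp0, if_neg (by simp)]
        apply List.filter_congr
        intro q _
        by_cases hqv : q.2 = p.2
        · have h1 : bNew S nd (p.2 :: t.map Prod.snd) q = false := by
            simp only [bNew]; rw [hqv, hS]; simp
          have h2 : bNew S nd (t.map Prod.snd) q = false := by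
            simp only [bNew]; rw [hqv, hS]; simp
          rw [h1, h2]
        · simp only [bNew, List.count_cons]
          simp [Ne.symm hqv]
    · by_cases hK : nd.contains p.2 = true
      · -- v already in new_dict: delete the entry and blacklist the value
        have hstep : bstep (nd, S) p = (nd.erase p.2, PySem.Set.add S p.2) := by
          simp only [bstep]; rw [if_neg hS, if_pos hK]
        have hdisj' : ∀ v ∈ PySem.Set.add S p.2, (nd.erase p.2).contains v = false := by
          intro v hv
          rw [contains_erase]
          rcases (PySem.Set.mem_add _ _ _).mp hv with hv | hv
          · rw [hdisj v hv]; rfl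
          · subst hv; simp
        have hnd' : (nd.erase p.2).keys.Nodup :=
          List.Nodup.sublist (List.Sublist.map Prod.fst List.filter_sublist) hnd
        rw [hstep, ih _ _ hdisj' hnd']
        congr 1
        · -- erased dict filtered over t's values = nd filtered over (p::t)'s values
          show (nd.items.filter (fun q => !(q.1 == p.2))).filter
                (fun q => !((t.map Prod.snd).contains q.1)) = _
          rw [List.filter_filter]
          apply List.filter_congr
          intro q _
          rw [List.map_cons, List.contains_cons]
          by_cases hq : q.1 = p.2
          · simp [hq]
          · simp [Bool.and_comm]
        · congr 1
          rw [List.map_cons, List.filter_cons]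
          have hp0 : bNew S nd (p.2 :: t.map Prod.snd) p = false := by
            simp only [bNew]; rw [hK]; simp
          rw [hp0, if_neg (by simp)]
          apply List.filter_congr
          intro q _
          by_cases hqv : q.2 = p.2
          · have h1 : bNew S nd (p.2 :: t.map Prod.snd) q = false := by
              simp only [bNew]; rw [hqv, hK]; simp
            have h2 : bNew (PySem.Set.add S p.2) (nd.erase p.2) (t.map Prod.snd) q
                = false := by
              have hc : PySem.Set.contains (PySem.Set.add S p.2) q.2 = true := by
                rw [set_contains_add, hqv]; simp
              simp only [bNew]; rw [hc]; simp
            rw [h1, h2]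
          · have hcer : (nd.erase p.2).contains q.2 = nd.contains q.2 := by
              rw [contains_erase]; simp [hqv]
            have hSadd : PySem.Set.contains (PySem.Set.add S p.2) q.2
                = PySem.Set.contains S q.2 := by
              rw [set_contains_add]; simp [hqv]
            simp only [bNew, hcer, hSadd, List.count_cons]
            simp [Ne.symm hqv]
      · -- fresh value: insert it
        have hKf : nd.contains p.2 = false := by simpa using hK
        have hstep : bstep (nd, S) p = (nd.insert p.2 p.1, S) := by
          simp only [bstep]; rw [if_neg hS, if_neg hK]
        have hdisj' : ∀ v ∈ S, (nd.insert p.2 p.1).contains v = false := by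
          intro v hv
          have hvne : v ≠ p.2 := by
            intro h; rw [h] at hv
            rw [(PySem.Set.contains_iff _ _).mpr hv] at hS; exact hS rfl
          rw [PySem.Dict.contains_insert]
          simp [hvne, hdisj v hv]
        have hnd' : (nd.insert p.2 p.1).keys.Nodup := by
          rw [PySem.Dict.keys_insert_of_not_contains _ _ hKf]
          refine List.nodup_append.mpr ⟨hnd, List.nodup_singleton _, ?_⟩
          intro a ha b hb hab
          rw [List.mem_singleton] at hb
          rw [← PySem.Dict.contains_iff_mem_keys] at ha
          rw [hab, hb, hKf] at ha; exact absurd ha (by simp)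
        rw [hstep, ih _ _ hdisj' hnd']
        rw [PySem.Dict.items_insert_of_not_contains _ _ hKf, List.filter_append]
        have hsplit :
            nd.items.filter (fun q => !((t.map Prod.snd).contains q.1))
              = nd.items.filter (fun q => !(((p :: t).map Prod.snd).contains q.1)) := by
          apply List.filter_congr
          intro q hq
          have hqk : q.1 ≠ p.2 := by
            intro h
            have hc : nd.contains q.1 = true := by
              rw [PySem.Dict.contains_iff_mem_keys]
              exact PySem.Dict.mem_keys_of_mem_items _ hq
            rw [h, hKf] at hc; exact absurd hc (by simp)
          rw [List.map_cons, List.contains_cons]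
          simp [hqk]
        rw [← hsplit, List.append_assoc]
        congr 1
        conv_rhs => rw [List.map_cons, List.filter_cons]
        have hpB : bNew S nd (p.2 :: t.map Prod.snd) p
            = !((t.map Prod.snd).contains p.2) := by
          simp only [bNew]; rw [hKf]
          have hSf : PySem.Set.contains S p.2 = false := by
            cases hc : PySem.Set.contains S p.2 with
            | true => exact absurd hc hS
            | false => rfl
          rw [hSf]
          simp only [Bool.not_false, Bool.true_and, Bool.and_true, List.count_cons_self]
          cases hc : (t.map Prod.snd).contains p.2 with
          | true =>
            have h1 : 1 ≤ (t.map Prod.snd).count p.2 :=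
              List.one_le_count_iff.mpr (by simpa using hc)
            have h2 : ((t.map Prod.snd).count p.2 + 1 == 1) = false := by
              simp only [beq_eq_false_iff_ne, ne_eq]; omega
            simp [h2]
          | false =>
            have h0 : (t.map Prod.snd).count p.2 = 0 :=
              List.count_eq_zero.mpr (by simpa using hc)
            simp [h0]
        rw [hpB]
        have hrest : t.filter (bNew S nd (p.2 :: t.map Prod.snd))
            = t.filter (bNew S (nd.insert p.2 p.1) (t.map Prod.snd)) := by
          apply List.filter_congr
          intro q hq
          by_cases hqv : q.2 = p.2
          · have hmem : p.2 ∈ t.map Prod.snd := hqv ▸ List.mem_map_of_mem hq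
            have hcnt : 1 ≤ (t.map Prod.snd).count p.2 := List.one_le_count_iff.mpr hmem
            have h1 : bNew S nd (p.2 :: t.map Prod.snd) q = false := by
              have hc : ((p.2 :: t.map Prod.snd).count q.2 == 1) = false := by
                rw [hqv, List.count_cons_self]
                simp only [beq_eq_false_iff_ne, ne_eq]; omega
              simp only [bNew]; rw [hc]; simp
            have h2 : bNew S (nd.insert p.2 p.1) (t.map Prod.snd) q = false := by
              have hc : (nd.insert p.2 p.1).contains q.2 = true := by
                rw [hqv]; exact PySem.Dict.contains_insert_self _ _ _
              simp only [bNew]; rw [hc]; simp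
            rw [h1, h2]
          · have hcc : (nd.insert p.2 p.1).contains q.2 = nd.contains q.2 := by
              rw [PySem.Dict.contains_insert]; simp [hqv]
            simp only [bNew, hcc, List.count_cons]
            simp [Ne.symm hqv]
        rw [hrest]
        cases hc : (t.map Prod.snd).contains p.2 with
        | true =>
          have hm : p.2 ∈ t.map Prod.snd := by simpa using hc
          obtain ⟨q, hq, hq2⟩ := List.mem_map.mp hm
          simp
          refine ⟨q.1, ?_⟩
          have hq' : (q.1, q.2) ∈ t := by simpa using hq
          rwa [hq2] at hq'
        | false =>
          have hm : p.2 ∉ t.map Prod.snd := by simpa using hc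
          simp [hm]

-- ===== VERDICT (by name: the statement is the Claim_ definition above) =====
theorem swap_keys_values_spec : Claim_equal_swap_keys_values := by
  intro d _
  unfold Spec_swap_keys_values
  rw [A_items]
  unfold swap_keys_values_alt
  rw [B_loop d PySem.Dict.empty PySem.Set.empty
        (fun v hv => absurd hv (by simp [PySem.Set.empty])) (by simp)]
  have he : (PySem.Dict.empty : PySem.Dict Int Int).items = [] := rfl
  rw [he, List.filter_nil, List.nil_append]
  have hf : d.filter (fun p => (d.map Prod.snd).count p.2 == 1)
      = d.filter (bNew PySem.Set.empty PySem.Dict.empty (d.map Prod.snd)) :=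
    List.filter_congr (fun p _ => by
      simp [bNew, PySem.Set.empty, PySem.Set.contains])
  rw [hf]
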